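-- pv_equiv track=rewrite | github.com/Marghrid/FP | Exercicios/a06_1.py | apenas_digitos_impares
-- ===== SOURCE A (Python) =====
-- def apenas_digitos_impares (n):
--
--     if isinstance (n, int):
--         if n>0:
--             if n%2 == 1:
--                 if n<10:
--                     return n
--                 else:
--                     return n%10 + apenas_digitos_impares(n//10) * 10
--             else:
--                 return apenas_digitos_impares(n//10)
--         elif n == 0:
--             return 0
--         else:
--             raise ValueError('apenas_digitos_impares:', 'o argumento deve ser um inteiro não negativo')
--     else:
--         raise TypeError('apenas_digitos_impares:', 'o argumento deve ser um inteiro')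
-- ===== SOURCE B (Python) =====
-- def apenas_digitos_impares(n):
--     if not isinstance(n, int):
--         raise TypeError('apenas_digitos_impares:', 'o argumento deve ser um inteiro')
--     if n < 0:
--         raise ValueError('apenas_digitos_impares:', 'o argumento deve ser um inteiro não negativo')
--     result = 0
--     mult = 1
--     m = n
--     while m > 0:
--         d = m % 10
--         if d % 2 == 1:
--             result += d * mult
--             mult *= 10
--         m //= 10
--     return result
-- ===== Notes on version B (the rewrite author's own statement) =====
-- stated objective: simpler
-- what changed: Replaces the recursion with a single iterative loop that peels digits least-significant-first and rebuilds the odd-digit number with an explicit place-value accumulator.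
import Mathlib
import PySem

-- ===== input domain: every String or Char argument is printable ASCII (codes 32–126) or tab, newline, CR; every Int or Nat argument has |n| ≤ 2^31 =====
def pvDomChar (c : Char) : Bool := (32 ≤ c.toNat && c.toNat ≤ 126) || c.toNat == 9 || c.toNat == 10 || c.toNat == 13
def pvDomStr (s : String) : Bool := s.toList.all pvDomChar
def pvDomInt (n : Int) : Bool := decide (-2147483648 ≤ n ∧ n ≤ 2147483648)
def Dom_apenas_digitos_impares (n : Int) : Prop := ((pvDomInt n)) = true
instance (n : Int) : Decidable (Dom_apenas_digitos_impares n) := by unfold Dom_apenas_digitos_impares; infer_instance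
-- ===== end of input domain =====

-- B replaces A's recursion by a single iterative digit-peeling loop with an explicit
-- place-value accumulator (objective: simpler, constant stack). Return values agree on
-- all nonnegative ints; both raise on negative ints (excluded by Pre_).

-- ===== PORT A =====
def apenas_digitos_impares (n : Int) : Int :=
  if 0 < n then
    if PySem.Int.mod n 2 = 1 then
      if n < 10 then n
      else PySem.Int.mod n 10 + apenas_digitos_impares (PySem.Int.floordiv n 10) * 10
    else apenas_digitos_impares (PySem.Int.floordiv n 10)
  else 0  -- Python: n == 0 → 0; n < 0 raises ValueError (excluded by Pre_)
termination_by n.toNat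
decreasing_by
  all_goals
    simp only [PySem.Int.floordiv_eq_ediv_of_pos (by omega : (0:Int) < 10)]; omega

-- ===== PORT B =====
-- the while-loop of Source B, state (m, result, mult)
def pvAltLoop (m result mult : Int) : Int :=
  if 0 < m then
    let d := PySem.Int.mod m 10
    if PySem.Int.mod d 2 = 1 then
      pvAltLoop (PySem.Int.floordiv m 10) (result + d * mult) (mult * 10)
    else
      pvAltLoop (PySem.Int.floordiv m 10) result mult
  else result
termination_by m.toNat
decreasing_by
  all_goals
    simp only [PySem.Int.floordiv_eq_ediv_of_pos (by omega : (0:Int) < 10)]; omega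

def apenas_digitos_impares_alt (n : Int) : Int := pvAltLoop n 0 1

-- ===== PRECONDITION & SPEC =====
-- Python A raises ValueError on negative n (and B raises the same there): Pre_ admits the nonnegative ints.
def Pre_apenas_digitos_impares (n : Int) : Prop := 0 ≤ n
instance (n : Int) : Decidable (Pre_apenas_digitos_impares n) := by unfold Pre_apenas_digitos_impares; infer_instance
def pvWitness_apenas_digitos_impares : Int := 123

def Spec_apenas_digitos_impares (n : Int) (out : Int) : Prop := out = apenas_digitos_impares_alt n
instance (n : Int) (out : Int) : Decidable (Spec_apenas_digitos_impares n out) := by unfold Spec_apenas_digitos_impares; infer_instance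

-- ===== CLAIM (what is proved, stated in full; the proofs are below) =====
def Claim_equal_apenas_digitos_impares : Prop := ∀ (n : Int), Dom_apenas_digitos_impares n → Pre_apenas_digitos_impares n → Spec_apenas_digitos_impares n (apenas_digitos_impares n)

-- ===== LEMMAS AND PROOFS =====

-- loop invariant: B's loop computes result + mult * (A of the remaining digits)
theorem pvAltLoop_eq (N : Nat) :
    ∀ (m : Int), m.toNat ≤ N → 0 ≤ m → ∀ (r k : Int),
      pvAltLoop m r k = r + k * apenas_digitos_impares m := by
  induction N with
  | zero =>
    intro m hle h0 r k
    have hm : m = 0 := by omega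
    subst hm
    rw [pvAltLoop, apenas_digitos_impares]
    norm_num
  | succ N ih =>
    intro m hle h0 r k
    by_cases hm : 0 < m
    · have hdiv : PySem.Int.floordiv m 10 = m / 10 :=
        PySem.Int.floordiv_eq_ediv_of_pos (by omega)
      have hmod : PySem.Int.mod m 10 = m % 10 :=
        PySem.Int.mod_eq_emod_of_pos (by omega)
      have hmod2 : PySem.Int.mod m 2 = m % 2 :=
        PySem.Int.mod_eq_emod_of_pos (by omega)
      have hmodd2 : PySem.Int.mod (m % 10) 2 = (m % 10) % 2 :=
        PySem.Int.mod_eq_emod_of_pos (by omega)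
      have hrec : (m / 10).toNat ≤ N := by omega
      have hpar : (m % 10) % 2 = m % 2 := by omega
      rw [pvAltLoop, apenas_digitos_impares]
      simp only [hm, if_pos, hdiv, hmod, hmod2, hmodd2, hpar]
      by_cases hodd : m % 2 = 1
      · simp only [hodd, if_pos]
        rw [ih (m / 10) hrec (by omega)]
        by_cases hsmall : m < 10
        · have h10 : m / 10 = 0 := by omega
          have hm10 : m % 10 = m := by omega
          rw [h10, apenas_digitos_impares]
          simp only [hsmall, if_pos, lt_irrefl, if_false]
          rw [hm10]; ring
        · simp only [hsmall, if_false]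
          ring
      · simp only [hodd, if_false]
        rw [ih (m / 10) hrec (by omega)]
    · have hm0 : m = 0 := by omega
      subst hm0
      rw [pvAltLoop, apenas_digitos_impares]
      norm_num

-- ===== VERDICT (by name: the statement is the Claim_ definition above) =====
theorem apenas_digitos_impares_spec : Claim_equal_apenas_digitos_impares := by
  intro n _ hpre
  unfold Spec_apenas_digitos_impares apenas_digitos_impares_alt
  rw [pvAltLoop_eq n.toNat n le_rfl hpre]
  ring
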